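-- pv_equiv track=rewrite | github.com/leobang17/algorithm_python | 우테코/우테코07.py | solution
-- ===== SOURCE A (Python) =====
-- from copy import deepcopy
--
-- def solution(grid, clockwise):
--     answer = []
--     length = len(grid)
--     table = [[] for _ in range(length)]
--     table[0] = [[length - 1, 0]]
--     for i in range(1, length):
--         temp_table = deepcopy(table[i - 1])
--         for t in temp_table:
--             t[0] -= 1
--         table[i] = [[length - 1, i * 2], [length - 1, i * 2 - 1]] + temp_table
--
--     if clockwise:
--         for i, table_iter in enumerate(table):
--             answer.append("")
--             for j in table_iter:
--                 answer[i] += grid[j[0]][j[1]]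
--     else:
--         for i in range(len(grid)):
--             grid[i] = grid[i][::-1]
--         for i, table_iter in enumerate(table):
--             answer.append("")
--             for j in table_iter:
--                 answer[i] += grid[j[0]][j[1]]
--         for i in range(len(answer)):
--             answer[i] = answer[i][::-1]
--
--     return answer
-- ===== SOURCE B (Python) =====
-- def solution(grid, clockwise):
--     # Note: like A, this mutates grid in place (reverses each row) when clockwise is false.
--     n = len(grid)
--     if not clockwise:
--         for i in range(n):
--             grid[i] = grid[i][::-1]
--     answer = []
--     for i in range(n):
--         row = "".join(grid[n - 1 - k // 2][2 * i - k] for k in range(2 * i + 1))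
--         answer.append(row if clockwise else row[::-1])
--     return answer
-- ===== Notes on version B (the rewrite author's own statement) =====
-- stated objective: simpler
-- what changed: B drops A's deepcopy-based coordinate-table construction entirely and reads each output row directly with the closed-form coordinates grid[n-1-k//2][2*i-k] for k in 0..2*i, joining the characters in one pass.
import Mathlib
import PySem

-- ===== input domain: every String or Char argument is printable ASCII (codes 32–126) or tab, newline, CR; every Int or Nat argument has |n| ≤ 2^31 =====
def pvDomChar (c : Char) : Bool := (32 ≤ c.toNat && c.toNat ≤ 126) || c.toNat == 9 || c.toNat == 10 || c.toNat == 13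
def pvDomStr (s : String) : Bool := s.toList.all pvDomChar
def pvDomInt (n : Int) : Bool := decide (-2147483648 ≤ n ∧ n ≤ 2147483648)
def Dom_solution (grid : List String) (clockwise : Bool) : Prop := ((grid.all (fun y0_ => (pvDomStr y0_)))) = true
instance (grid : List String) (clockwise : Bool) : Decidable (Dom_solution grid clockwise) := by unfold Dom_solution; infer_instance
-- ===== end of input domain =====

-- B replaces A's deepcopy-built coordinate table with a direct closed-form read of each row (objective: simpler).
-- Like A, the Python B reverses grid's rows in place when clockwise is false (same side effect);
-- the equivalence proved here is about the return value.

-- ===== PORT A =====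
-- grid[j[0]][j[1]]: one character; the defaults are never reached on Pre_ inputs
def pvReadA (g : List (List Char)) (j : Int × Int) : Char :=
  PySem.List.pyGetD (PySem.List.pyGetD g j.1 []) j.2 ' '

def solution (grid : List String) (clockwise : Bool) : List String :=
  let g := grid.map String.toList
  let length : Int := PySem.List.len g
  -- table[0] = [[length-1, 0]]; for i in range(1, length):
  --   table[i] = [[length-1, 2i], [length-1, 2i-1]] + (deepcopy of table[i-1] with rows decremented)
  let table : List (List (Int × Int)) :=
    (PySem.List.pyRange 1 length 1).foldl
      (fun tbl i =>
        tbl ++ [[(length - 1, i * 2), (length - 1, i * 2 - 1)] ++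
                (PySem.List.pyGetD tbl (i - 1) []).map (fun t => (t.1 - 1, t.2))])
      [[(length - 1, 0)]]
  if clockwise then
    table.map (fun row => String.ofList (row.foldl (fun s j => s ++ [pvReadA g j]) []))
  else
    let g2 := g.map List.reverse
    (table.map (fun row => row.foldl (fun s j => s ++ [pvReadA g2 j]) [])).map
      (fun s => String.ofList s.reverse)

-- ===== PORT B =====
def solution_alt (grid : List String) (clockwise : Bool) : List String :=
  let n : Int := PySem.List.len grid
  let g := if clockwise then grid.map String.toList
           else (grid.map String.toList).map List.reverse
  (PySem.List.pyRange 0 n 1).map (fun i =>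
    let row : List Char :=
      (PySem.List.pyRange 0 (2 * i + 1) 1).map (fun k =>
        PySem.List.pyGetD
          (PySem.List.pyGetD g (n - 1 - PySem.Int.floordiv k 2) []) (2 * i - k) ' ')
    if clockwise then String.ofList row else String.ofList row.reverse)

-- ===== PRECONDITION & SPEC =====
-- Pre_ is exactly where the Python A returns normally: the grid is nonempty (on [] A raises
-- IndexError assigning table[0]) and row i has at least 2*i+1 characters (else the reads raise IndexError).
def Pre_solution (grid : List String) (clockwise : Bool) : Prop :=
  grid ≠ [] ∧ ∀ i < grid.length, 2 * i + 1 ≤ (grid.getD i "").toList.length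
instance (grid : List String) (clockwise : Bool) : Decidable (Pre_solution grid clockwise) := by
  unfold Pre_solution; infer_instance
def pvWitness_solution : List String × Bool := (["abc"], true)

def Spec_solution (grid : List String) (clockwise : Bool) (out : List String) : Prop :=
  out = solution_alt grid clockwise
instance (grid : List String) (clockwise : Bool) (out : List String) : Decidable (Spec_solution grid clockwise out) := by
  unfold Spec_solution; infer_instance

-- ===== CLAIM =====
def Claim_equal_solution : Prop := ∀ (grid : List String) (clockwise : Bool),
  Dom_solution grid clockwise → Pre_solution grid clockwise →
  Spec_solution grid clockwise (solution grid clockwise)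

-- ===== LEMMAS AND PROOFS =====

-- closed form of A's table row i: table[i][k] = (L - 1 - k // 2, 2*i - k) for k in range(2*i + 1)
def pvCoords (L : Int) (i : Nat) : List (Int × Int) :=
  (List.range (2 * i + 1)).map (fun k => (L - 1 - ((k / 2 : Nat) : Int), 2 * (i : Int) - (k : Int)))

theorem pvCoords_succ (L : Int) (i : Nat) :
    pvCoords L (i + 1) =
      [(L - 1, ((i : Int) + 1) * 2), (L - 1, ((i : Int) + 1) * 2 - 1)] ++
        (pvCoords L i).map (fun t => (t.1 - 1, t.2)) := by
  unfold pvCoords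
  have h : 2 * (i + 1) + 1 = (2 * i + 1) + 1 + 1 := by omega
  rw [h, List.range_succ_eq_map, List.range_succ_eq_map]
  simp [List.map_map, Function.comp]
  and_intros
  all_goals try intro a _
  all_goals and_intros
  all_goals omega

-- A's table-building fold produces exactly the closed-form rows
theorem pvTable_fold (n m : Nat) (h1 : 1 ≤ m) :
    (PySem.List.pyRange 1 (m : Int) 1).foldl
      (fun tbl i =>
        tbl ++ [[((n : Int) - 1, i * 2), ((n : Int) - 1, i * 2 - 1)] ++
                (PySem.List.pyGetD tbl (i - 1) []).map (fun t => (t.1 - 1, t.2))])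
      [[((n : Int) - 1, 0)]]
    = (List.range m).map (pvCoords (n : Int)) := by
  induction m with
  | zero => omega
  | succ m ih =>
    rcases Nat.eq_or_lt_of_le h1 with h | h
    · have hm : m = 0 := by omega
      subst hm
      simp [PySem.List.pyRange, pvCoords]
    · have hm : 1 ≤ m := by omega
      obtain ⟨j, rfl⟩ : ∃ j, m = j + 1 := ⟨m - 1, by omega⟩
      rw [show (((j + 1 + 1 : Nat)) : Int) = ((j + 1 : Nat) : Int) + 1 by push_cast; ring,
          PySem.List.pyRange_one_succ_right (by exact_mod_cast hm), List.foldl_append,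
          ih hm]
      simp only [List.foldl_cons, List.foldl_nil]
      have hidx : (PySem.List.pyGetD ((List.range (j + 1)).map (pvCoords (n : Int))) (((j + 1 : Nat) : Int) - 1) []) = pvCoords (n : Int) j := by
        rw [show (((j + 1 : Nat) : Int) - 1) = ((j : Nat) : Int) by push_cast; ring, PySem.List.pyGetD_natCast]
        rw [List.getD_eq_getElem?_getD]
        simp
      rw [hidx, show List.range (j + 1 + 1) = List.range (j + 1) ++ [j + 1] from List.range_succ, List.map_append]
      congr 1
      simp only [List.map_singleton]
      congr 1
      rw [pvCoords_succ]
      simp only [show (((j + 1 : Nat)) : Int) = ((j : Nat) : Int) + 1 by push_cast; ring]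

-- reading a closed-form row equals B's direct per-index read
theorem pvRow_eq (g : List (List Char)) (n i : Nat) :
    (pvCoords (n : Int) i).map (pvReadA g) =
      (PySem.List.pyRange 0 (2 * (i : Int) + 1) 1).map (fun k =>
        PySem.List.pyGetD
          (PySem.List.pyGetD g ((n : Int) - 1 - PySem.Int.floordiv k 2) []) (2 * (i : Int) - k) ' ') := by
  rw [show (2 * (i : Int) + 1) = ((2 * i + 1 : Nat) : Int) by push_cast; ring,
      PySem.List.pyRange_zero_natCast]
  unfold pvCoords
  rw [List.map_map, List.map_map]
  apply List.map_congr_left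
  intro k _
  simp [pvReadA]

-- ===== VERDICT =====
theorem solution_spec : Claim_equal_solution := by
  intro grid clockwise _ hpre
  unfold Spec_solution
  have hN : 1 ≤ grid.length := List.length_pos_iff.mpr hpre.1
  unfold solution solution_alt
  simp only [PySem.List.len_eq, List.length_map]
  rw [pvTable_fold grid.length grid.length hN, PySem.List.pyRange_zero_natCast]
  cases clockwise with
  | true =>
    simp only [reduceIte, List.map_map]
    apply List.map_congr_left
    intro i _
    simp only [Function.comp_apply,
      PySem.List.foldl_append_singleton_eq_map (pvReadA (grid.map String.toList)), List.nil_append]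
    rw [pvRow_eq]
  | false =>
    simp only [Bool.false_eq_true, reduceIte, List.map_map]
    apply List.map_congr_left
    intro i _
    simp only [Function.comp_apply,
      PySem.List.foldl_append_singleton_eq_map, List.nil_append]
    rw [pvRow_eq]
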